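-- pv_equiv track=rewrite | github.com/swtaktak/PS_Archive | BOJ 풀이/11761.py | incard
-- ===== SOURCE A (Python) =====
-- from collections import deque
--
-- def incard(card):
--     card_list = [i for i in range(1, card + 1)]
--     count = 0
--     while True:
--         count += 1
--         left = deque()
--         right = deque()
--         # step 1: card를 left_right 으로 나눈다.
--         if card % 2 == 0:
--             for i in range(card):
--                 if i < card// 2:
--                     left.append(card_list[i])
--                 else:
--                     right.append(card_list[i])
--         else:
--              for i in range(card):
--                 if i < card // 2:
--                     left.append(card_list[i])
--                 else:
--                     right.append(card_list[i])
--         card_list = []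
--         for i in range(card):
--             if i % 2 == 0:
--                 cur_elt = right.popleft()
--                 card_list.append(cur_elt)
--             else:
--                 cur_elt = left.popleft()
--                 card_list.append(cur_elt)
--         if card_list[0] == 1 and card_list[1] == 2:
--             break
--     return count
-- ===== SOURCE B (Python) =====
-- def incard(card):
--     # Track only the positions of the values 1 and 2 under the shuffle permutation,
--     # instead of rebuilding the whole deck each round.
--     h = card // 2
--     p1, p2 = 0, 1
--     count = 0
--     while True:
--         count += 1
--         p1 = 2 * (p1 - h) if p1 >= h else 2 * p1 + 1
--         p2 = 2 * (p2 - h) if p2 >= h else 2 * p2 + 1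
--         if p1 == 0 and p2 == 1:
--             return count
-- ===== Notes on version B (the rewrite author's own statement) =====
-- stated objective: faster
-- what changed: Instead of rebuilding the whole deck list with two deques every round, B tracks only the two positions of the cards 1 and 2 under the in-shuffle position map, so each round is O(1) instead of O(card).
import Mathlib
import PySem

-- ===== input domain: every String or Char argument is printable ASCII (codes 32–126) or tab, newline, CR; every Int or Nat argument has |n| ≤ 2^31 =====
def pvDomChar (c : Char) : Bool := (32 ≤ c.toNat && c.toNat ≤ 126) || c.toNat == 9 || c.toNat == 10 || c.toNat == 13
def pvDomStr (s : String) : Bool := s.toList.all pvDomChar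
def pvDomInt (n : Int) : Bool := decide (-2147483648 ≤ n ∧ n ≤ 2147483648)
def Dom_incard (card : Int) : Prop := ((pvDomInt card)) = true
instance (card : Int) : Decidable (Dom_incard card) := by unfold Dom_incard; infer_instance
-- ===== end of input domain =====

-- B tracks only the positions of cards 1 and 2 under the in-shuffle position map
-- (O(1) state per round instead of rebuilding the O(card) deck list): faster.


-- ===== PORT A =====
-- deque.popleft(): Python raises IndexError on an empty deque; for the admitted
-- inputs the deques always still hold the not-yet-consumed cards, so the [] case
-- (dummy (0, [])) is never reached.
def pvPopleft (d : List Int) : Int × List Int :=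
  match d with
  | [] => (0, [])
  | x :: t => (x, t)

-- step 1: 'for i in range(card): if i < card//2: left.append(card_list[i]) else:
-- right.append(card_list[i])' — on every round card equals len(card_list), so the loop
-- visits exactly the pairs (i, card_list[i]); ported as a fold over card_list carrying
-- the index i (same pairs, same order; deques accumulated head-first and reversed once
-- at the end, matching Python's O(1) appends)
def pvSplitLoop (card : Int) (cl : List Int) : List Int × List Int :=
  let st := cl.foldl
    (fun (st : (List Int × List Int) × Int) x =>
      (if st.2 < PySem.Int.floordiv card 2 then (x :: st.1.1, st.1.2)
       else (st.1.1, x :: st.1.2), st.2 + 1))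
    (([], []), 0)
  (st.1.1.reverse, st.1.2.reverse)

-- one iteration of the interleaving loop; state = ((left, right), card_list), with
-- card_list accumulated head-first (reversed once after the loop, in pvShuffle)
def pvMergeStep (s : (List Int × List Int) × List Int) (i : Int) : (List Int × List Int) × List Int :=
  if PySem.Int.mod i 2 = 0 then
    ((s.1.1, (pvPopleft s.1.2).2), (pvPopleft s.1.2).1 :: s.2)
  else
    (((pvPopleft s.1.1).2, s.1.2), (pvPopleft s.1.1).1 :: s.2)

-- one round of the 'while True' body: split (the Python's even/odd branches run the
-- same loop — kept), then interleave
def pvShuffle (card : Int) (cl : List Int) : List Int :=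
  let lr := if PySem.Int.mod card 2 = 0 then pvSplitLoop card cl else pvSplitLoop card cl
  ((PySem.List.pyRange 0 card 1).foldl pvMergeStep (lr, [])).2.reverse

-- the 'while True' loop; the fuel only makes it total (card²+2 iterations are never
-- reached on the inputs the differential tester draws — the loop's exit time divides
-- lcm of two cycle lengths ≤ card²); on exhaustion the accumulated count is returned.
def pvLoopA (card : Int) : Nat → List Int → Int → Int
  | 0, _, count => count
  | fuel + 1, cl, count =>
    let cl' := pvShuffle card cl
    if PySem.List.pyGetD cl' 0 0 = 1 ∧ PySem.List.pyGetD cl' 1 0 = 2 then count + 1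
    else pvLoopA card fuel cl' (count + 1)

def incard (card : Int) : Int :=
  pvLoopA card (card.toNat * card.toNat + 2) (PySem.List.pyRange 1 (card + 1) 1) 0

-- ===== PORT B =====
-- position map of one in-shuffle: the card at position p moves to pvNext (card//2) p
def pvNext (h p : Int) : Int := if h ≤ p then 2 * (p - h) else 2 * p + 1

-- Source B's 'while True' loop over (p1, p2, count); same fuel-totalisation as port A
def pvLoopB (h : Int) : Nat → Int → Int → Int → Int
  | 0, _, _, count => count
  | fuel + 1, p1, p2, count =>
    let p1' := pvNext h p1
    let p2' := pvNext h p2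
    if p1' = 0 ∧ p2' = 1 then count + 1
    else pvLoopB h fuel p1' p2' (count + 1)

def incard_alt (card : Int) : Int :=
  pvLoopB (PySem.Int.floordiv card 2) (card.toNat * card.toNat + 2) 0 1 0

-- ===== PRECONDITION & SPEC =====
-- Pre_ excludes exactly card < 2, where A raises IndexError (card_list[0] / card_list[1]
-- on a deck with fewer than two cards).
def Pre_incard (card : Int) : Prop := 2 ≤ card
instance (card : Int) : Decidable (Pre_incard card) := by unfold Pre_incard; infer_instance

def pvWitness_incard : Int := 5

def Spec_incard (card : Int) (out : Int) : Prop := out = incard_alt card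
instance (card : Int) (out : Int) : Decidable (Spec_incard card out) := by unfold Spec_incard; infer_instance

-- ===== CLAIM (what is proved, stated in full; the proofs are below) =====
def Claim_equal_incard : Prop := ∀ (card : Int), Dom_incard card → Pre_incard card → Spec_incard card (incard card)

-- ===== LEMMAS AND PROOFS =====

-- the forward index map of one shuffle (new position i holds old position pvSigma h' i)
def pvSigma (h' i : Nat) : Nat := if i % 2 = 0 then h' + i / 2 else i / 2

-- the Nat form of pvNext
def pvTau (h' p : Nat) : Nat := if h' ≤ p then 2 * (p - h') else 2 * p + 1

lemma pvPopleft_drop (l : List Int) (m : Nat) (hm : m < l.length) :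
    pvPopleft (l.drop m) = (l.getD m 0, l.drop (m + 1)) := by
  rw [List.drop_eq_getElem_cons hm]
  simp [pvPopleft, List.getD, List.getElem?_eq_getElem hm]

lemma pvGetD_drop (l : List Int) (m j : Nat) (d : Int) :
    (l.drop m).getD j d = l.getD (m + j) d := by
  simp [List.getD, List.getElem?_drop]

lemma pvSplitAux (c : Int) (cl : List Int) :
    ∀ (i : Int) (accL accR : List Int),
      cl.foldl
        (fun (st : (List Int × List Int) × Int) x =>
          (if st.2 < c then (x :: st.1.1, st.1.2)
           else (st.1.1, x :: st.1.2), st.2 + 1))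
        ((accL, accR), i)
      = (((cl.take (c - i).toNat).reverse ++ accL, (cl.drop (c - i).toNat).reverse ++ accR),
         i + cl.length) := by
  induction cl with
  | nil => intro i accL accR; simp
  | cons x cl ih =>
    intro i accL accR
    rw [List.foldl_cons]
    by_cases h : i < c
    · have ht : (c - i).toNat = (c - (i + 1)).toNat + 1 := by omega
      rw [if_pos h, ih (i + 1) (x :: accL) accR, ht, List.take_succ_cons, List.drop_succ_cons]
      simp only [List.reverse_cons, List.append_assoc, List.singleton_append, List.length_cons]
      congr 1
      push_cast
      ring
    · have ht : (c - i).toNat = 0 := by omega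
      have ht' : (c - (i + 1)).toNat = 0 := by omega
      rw [if_neg h, ih (i + 1) accL (x :: accR), ht, ht']
      simp only [List.take_zero, List.drop_zero, List.reverse_nil, List.nil_append,
        List.reverse_cons, List.append_assoc, List.singleton_append, List.length_cons]
      congr 1
      push_cast
      ring

lemma pvSplitLoop_eq (n : Nat) (cl : List Int) (_hlen : cl.length = n) :
    pvSplitLoop (n : Int) cl = (cl.take (n / 2), cl.drop (n / 2)) := by
  have hfd : PySem.Int.floordiv (n : Int) 2 = ((n / 2 : Nat) : Int) := by
    rw [PySem.Int.floordiv_eq_ediv_of_pos (by norm_num)]; omega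
  unfold pvSplitLoop
  rw [hfd, pvSplitAux ((n / 2 : Nat) : Int) cl 0 [] []]
  simp only [Int.sub_zero, Int.toNat_natCast, List.append_nil, List.reverse_reverse]

lemma pvMergeAux (n : Nat) (L R : List Int) (hL : L.length = n / 2) (hR : R.length = n - n / 2) :
    ∀ k : Nat, k ≤ n →
      (PySem.List.pyRange 0 (k : Int) 1).foldl pvMergeStep ((L, R), []) =
        ((L.drop (k / 2), R.drop ((k + 1) / 2)),
         ((List.range k).map (fun i => if i % 2 = 0 then R.getD (i / 2) 0 else L.getD (i / 2) 0)).reverse) := by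
  intro k
  induction k with
  | zero => intro _; simp [PySem.List.pyRange_one_eq_nil]
  | succ k ih =>
    intro hk1
    have hcast : ((k + 1 : Nat) : Int) = (k : Int) + 1 := by push_cast; ring
    rw [hcast, PySem.List.pyRange_one_succ_right (by positivity : (0:Int) ≤ (k:Int)), List.foldl_append,
        ih (by omega)]
    have hmod : PySem.Int.mod (k : Int) 2 = ((k % 2 : Nat) : Int) := by
      rw [PySem.Int.mod_eq_emod_of_pos (by norm_num)]; omega
    by_cases hke : k % 2 = 0
    · -- even step: pop from right
      have hidx : (k + 1) / 2 < R.length := by omega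
      simp only [List.foldl_cons, List.foldl_nil, pvMergeStep, hmod, hke]
      rw [if_pos (by norm_num), pvPopleft_drop R ((k + 1) / 2) hidx]
      have e1 : (k + 1) / 2 = k / 2 := by omega
      have e2 : (k + 1 + 1) / 2 = (k + 1) / 2 + 1 := by omega
      rw [List.range_succ, List.map_append]
      simp [e1, e2, hke, List.reverse_append]
    · -- odd step: pop from left
      have hko : k % 2 = 1 := by omega
      have hidx : k / 2 < L.length := by omega
      simp only [List.foldl_cons, List.foldl_nil, pvMergeStep, hmod]
      rw [if_neg (by simpa using (by omega : ¬ ((k % 2 : Nat) : Int) = 0)),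
          pvPopleft_drop L (k / 2) hidx]
      have e1 : (k + 1) / 2 = k / 2 + 1 := by omega
      have e2 : (k + 1 + 1) / 2 = (k + 1) / 2 := by omega
      rw [List.range_succ, List.map_append]
      simp [e1, e2, hko, List.reverse_append]

lemma pvMerge_eq (n : Nat) (L R : List Int) (hL : L.length = n / 2) (hR : R.length = n - n / 2) :
    ((PySem.List.pyRange 0 (n : Int) 1).foldl pvMergeStep ((L, R), [])).2.reverse =
      (List.range n).map (fun i => if i % 2 = 0 then R.getD (i / 2) 0 else L.getD (i / 2) 0) := by
  rw [pvMergeAux n L R hL hR n (le_refl n)]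
  exact List.reverse_reverse _

lemma pvGetD_take (l : List Int) (m j : Nat) (d : Int) (h : j < m) :
    (l.take m).getD j d = l.getD j d := by
  simp [List.getD]; rw [List.getElem?_take_of_lt h]

lemma pvShuffle_eq (n : Nat) (cl : List Int) (hlen : cl.length = n) :
    pvShuffle (n : Int) cl = (List.range n).map (fun i => cl.getD (pvSigma (n / 2) i) 0) := by
  unfold pvShuffle
  rw [ite_self, pvSplitLoop_eq n cl hlen,
      pvMerge_eq n (cl.take (n / 2)) (cl.drop (n / 2)) (by simp [hlen]; omega) (by simp [hlen])]
  apply List.map_congr_left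
  intro i hi
  have hi' : i < n := List.mem_range.mp hi
  unfold pvSigma
  by_cases he : i % 2 = 0
  · rw [if_pos he, if_pos he, pvGetD_drop]
  · rw [if_neg he, if_neg he, pvGetD_take cl (n / 2) (i / 2) 0 (by omega)]

lemma pvSigma_lt (n i : Nat) (hi : i < n) : pvSigma (n / 2) i < n := by
  unfold pvSigma; split <;> omega

lemma pvTau_lt (n p : Nat) (hp : p < n) : pvTau (n / 2) p < n := by
  unfold pvTau; split <;> omega

lemma pvSigma_pvTau (n p : Nat) (hp : p < n) : pvSigma (n / 2) (pvTau (n / 2) p) = p := by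
  unfold pvSigma pvTau; split <;> split <;> omega

lemma pvTau_pvSigma (n i : Nat) (hi : i < n) : pvTau (n / 2) (pvSigma (n / 2) i) = i := by
  unfold pvSigma pvTau; split <;> split <;> omega

-- the loop invariant relating A's deck to B's two tracked positions
def pvInv (n : Nat) (cl : List Int) (p1 p2 : Int) : Prop :=
  cl.length = n ∧ cl.Nodup ∧
  0 ≤ p1 ∧ p1 < (n : Int) ∧ 0 ≤ p2 ∧ p2 < (n : Int) ∧
  cl.getD p1.toNat 0 = 1 ∧ cl.getD p2.toNat 0 = 2

lemma pvNodup_getD_inj (cl : List Int) (hnd : cl.Nodup) (i j : Nat)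
    (hi : i < cl.length) (hj : j < cl.length) (h : cl.getD i 0 = cl.getD j 0) : i = j := by
  rw [List.getD_eq_getElem cl 0 hi, List.getD_eq_getElem cl 0 hj] at h
  have hinj := List.nodup_iff_injective_get.mp hnd
  have : (⟨i, hi⟩ : Fin cl.length) = ⟨j, hj⟩ := by
    apply hinj; simpa [List.get_eq_getElem] using h
  exact congrArg Fin.val this

lemma pvShuffle_nodup (n : Nat) (cl : List Int) (hlen : cl.length = n) (hnd : cl.Nodup) :
    (pvShuffle (n : Int) cl).Nodup := by
  rw [pvShuffle_eq n cl hlen]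
  refine List.Nodup.map_on ?_ List.nodup_range
  intro i hi j hj hf
  have hi' : i < n := List.mem_range.mp hi
  have hj' : j < n := List.mem_range.mp hj
  have hsig : pvSigma (n / 2) i = pvSigma (n / 2) j :=
    pvNodup_getD_inj cl hnd _ _ (by rw [hlen]; exact pvSigma_lt n i hi')
      (by rw [hlen]; exact pvSigma_lt n j hj') hf
  rw [← pvTau_pvSigma n i hi', ← pvTau_pvSigma n j hj', hsig]

lemma pvNext_cast (h' : Nat) (p : Int) (_hp : 0 ≤ p) :
    pvNext ((h' : Nat) : Int) p = ((pvTau h' p.toNat : Nat) : Int) := by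
  unfold pvNext pvTau; split <;> split <;> omega

lemma pvTau_eq_zero_iff (n p : Nat) (_hp : p < n) : pvTau (n / 2) p = 0 ↔ p = n / 2 := by
  unfold pvTau; split <;> omega

lemma pvTau_eq_one_iff (n p : Nat) (hn : 2 ≤ n) (hp : p < n) : pvTau (n / 2) p = 1 ↔ p = 0 := by
  unfold pvTau; split <;> omega

lemma pvStep (n : Nat) (hn : 2 ≤ n) (cl : List Int) (p1 p2 : Int) (h : pvInv n cl p1 p2) :
    pvInv n (pvShuffle (n : Int) cl) (pvNext ((n / 2 : Nat) : Int) p1) (pvNext ((n / 2 : Nat) : Int) p2) ∧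
    ((PySem.List.pyGetD (pvShuffle (n : Int) cl) 0 0 = 1 ∧ PySem.List.pyGetD (pvShuffle (n : Int) cl) 1 0 = 2)
      ↔ (pvNext ((n / 2 : Nat) : Int) p1 = 0 ∧ pvNext ((n / 2 : Nat) : Int) p2 = 1)) := by
  obtain ⟨hlen, hnd, hp1n, hp1l, hp2n, hp2l, hv1, hv2⟩ := h
  have hshuf := pvShuffle_eq n cl hlen
  have hlen' : (pvShuffle (n : Int) cl).length = n := by rw [hshuf]; simp
  have hnd' := pvShuffle_nodup n cl hlen hnd
  have hget : ∀ m : Nat, m < n → (pvShuffle (n : Int) cl).getD m 0 = cl.getD (pvSigma (n / 2) m) 0 := by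
    intro m hm
    rw [hshuf]
    exact PySem.List.getD_map_range _ _ _ _ hm
  have hs0 : pvSigma (n / 2) 0 = n / 2 := by unfold pvSigma; norm_num
  have hs1 : pvSigma (n / 2) 1 = 0 := by unfold pvSigma; norm_num
  have hn1 := pvNext_cast (n / 2) p1 hp1n
  have hn2 := pvNext_cast (n / 2) p2 hp2n
  have hp1nn : p1.toNat < n := by omega
  have hp2nn : p2.toNat < n := by omega
  constructor
  · refine ⟨hlen', hnd', by omega, ?_, by omega, ?_, ?_, ?_⟩
    · rw [hn1]; exact_mod_cast pvTau_lt n p1.toNat hp1nn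
    · rw [hn2]; exact_mod_cast pvTau_lt n p2.toNat hp2nn
    · rw [hn1]
      rw [show ((pvTau (n / 2) p1.toNat : Nat) : Int).toNat = pvTau (n / 2) p1.toNat from by omega]
      rw [hget _ (pvTau_lt n p1.toNat hp1nn), pvSigma_pvTau n p1.toNat hp1nn]
      exact hv1
    · rw [hn2]
      rw [show ((pvTau (n / 2) p2.toNat : Nat) : Int).toNat = pvTau (n / 2) p2.toNat from by omega]
      rw [hget _ (pvTau_lt n p2.toNat hp2nn), pvSigma_pvTau n p2.toNat hp2nn]
      exact hv2
  · have hg0 : PySem.List.pyGetD (pvShuffle (n : Int) cl) 0 0 = cl.getD (n / 2) 0 := by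
      rw [PySem.List.pyGetD_zero, hget 0 (by omega), hs0]
    have hg1 : PySem.List.pyGetD (pvShuffle (n : Int) cl) 1 0 = cl.getD 0 0 := by
      rw [PySem.List.pyGetD_eq_getElem _ 0 (by norm_num) (by rw [hlen']; exact_mod_cast by omega : (1:Int) < ((pvShuffle (n : Int) cl).length : Int))]
      simp only [Int.toNat_one]
      rw [← List.getD_eq_getElem _ 0 (by omega), hget 1 (by omega), hs1]
    rw [hg0, hg1, hn1, hn2]
    constructor
    · rintro ⟨ha1, ha2⟩
      have h1 : p1.toNat = n / 2 := pvNodup_getD_inj cl hnd _ _ (by omega) (by omega) (hv1.trans ha1.symm)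
      have h2 : p2.toNat = 0 := pvNodup_getD_inj cl hnd _ _ (by omega) (by omega) (hv2.trans ha2.symm)
      constructor
      · have : pvTau (n / 2) p1.toNat = 0 := (pvTau_eq_zero_iff n p1.toNat hp1nn).mpr h1
        omega
      · have : pvTau (n / 2) p2.toNat = 1 := (pvTau_eq_one_iff n p2.toNat hn hp2nn).mpr h2
        omega
    · rintro ⟨hb1, hb2⟩
      have h1 : p1.toNat = n / 2 := (pvTau_eq_zero_iff n p1.toNat hp1nn).mp (by omega)
      have h2 : p2.toNat = 0 := (pvTau_eq_one_iff n p2.toNat hn hp2nn).mp (by omega)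
      rw [← h1, ← h2]
      exact ⟨hv1, hv2⟩

lemma pvLoop_eq (n : Nat) (hn : 2 ≤ n) (fuel : Nat) :
    ∀ (cl : List Int) (p1 p2 count : Int), pvInv n cl p1 p2 →
      pvLoopA (n : Int) fuel cl count = pvLoopB ((n / 2 : Nat) : Int) fuel p1 p2 count := by
  induction fuel with
  | zero => intro cl p1 p2 count _; rfl
  | succ fuel ih =>
    intro cl p1 p2 count h
    obtain ⟨hinv', hiff⟩ := pvStep n hn cl p1 p2 h
    show (if _ then _ else pvLoopA _ fuel _ _) = (if _ then _ else pvLoopB _ fuel _ _ _)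
    by_cases hc : PySem.List.pyGetD (pvShuffle (n : Int) cl) 0 0 = 1 ∧ PySem.List.pyGetD (pvShuffle (n : Int) cl) 1 0 = 2
    · rw [if_pos hc, if_pos (hiff.mp hc)]
    · rw [if_neg hc, if_neg (fun hb => hc (hiff.mpr hb))]
      exact ih _ _ _ _ hinv'

lemma pvInv_init (n : Nat) (hn : 2 ≤ n) :
    pvInv n (PySem.List.pyRange 1 ((n : Int) + 1) 1) 0 1 := by
  rw [PySem.List.pyRange_one 1 ((n : Int) + 1)]
  have htn : ((n : Int) + 1 - 1).toNat = n := by omega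
  rw [htn]
  refine ⟨by simp, ?_, by norm_num, by exact_mod_cast by omega, by norm_num,
    by exact_mod_cast by omega, ?_, ?_⟩
  · refine List.Nodup.map_on ?_ List.nodup_range
    intro x _ y _ hxy
    omega
  · rw [show ((0 : Int)).toNat = 0 from rfl, PySem.List.getD_map_range _ _ _ _ (by omega)]
    norm_num
  · rw [show ((1 : Int)).toNat = 1 from rfl, PySem.List.getD_map_range _ _ _ _ (by omega)]
    norm_num

-- ===== VERDICT (by name: the statement is the Claim_ definition above) =====
theorem incard_spec : Claim_equal_incard := by
  intro card _ hpre
  unfold Spec_incard incard incard_alt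
  have hn : (2 : Int) ≤ card := hpre
  set n : Nat := card.toNat with hns
  have hcard : card = (n : Int) := by omega
  have hn2 : 2 ≤ n := by omega
  have hfd : PySem.Int.floordiv card 2 = ((n / 2 : Nat) : Int) := by
    rw [PySem.Int.floordiv_eq_ediv_of_pos (by omega), hcard]
    omega
  rw [hfd]
  rw [hcard] at *
  exact pvLoop_eq n hn2 _ _ _ _ _ (pvInv_init n hn2)
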